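-- pv_equiv track=rewrite | github.com/lancejames221b/agent-hivemind | src/mcp_bridge.py | _detect_server_type
-- ===== SOURCE A (Python) =====
-- from typing import Any, Dict, List, Optional, Union
--
-- def _detect_server_type(server_config: Dict[str, Any]) -> str:
--     """Detect the type of MCP server (stdio, http, sse)"""
--     command = server_config.get('command', '')
--     args = server_config.get('args', [])
--
--     # Check if it's using HTTP transport
--     if any('http://' in str(arg) for arg in args):
--         return 'http'
--     elif any('sse' in str(arg) for arg in args):
--         return 'sse'
--     else:
--         return 'stdio'  # Default to stdio
-- ===== SOURCE B (Python) =====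
-- def _detect_server_type(server_config):
--     """Detect the type of MCP server (stdio, http, sse)"""
--     saw_sse = False
--     for arg in server_config.get('args', []):
--         s = str(arg)
--         if 'http://' in s:
--             return 'http'
--         if 'sse' in s:
--             saw_sse = True
--     return 'sse' if saw_sse else 'stdio'
-- ===== Notes on version B (the rewrite author's own statement) =====
-- stated objective: simpler
-- what changed: Replaced A's two separate any() scans over args by a single explicit loop with an early return on 'http://' and a deferred saw_sse flag, preserving http's global priority.
import Mathlib
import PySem

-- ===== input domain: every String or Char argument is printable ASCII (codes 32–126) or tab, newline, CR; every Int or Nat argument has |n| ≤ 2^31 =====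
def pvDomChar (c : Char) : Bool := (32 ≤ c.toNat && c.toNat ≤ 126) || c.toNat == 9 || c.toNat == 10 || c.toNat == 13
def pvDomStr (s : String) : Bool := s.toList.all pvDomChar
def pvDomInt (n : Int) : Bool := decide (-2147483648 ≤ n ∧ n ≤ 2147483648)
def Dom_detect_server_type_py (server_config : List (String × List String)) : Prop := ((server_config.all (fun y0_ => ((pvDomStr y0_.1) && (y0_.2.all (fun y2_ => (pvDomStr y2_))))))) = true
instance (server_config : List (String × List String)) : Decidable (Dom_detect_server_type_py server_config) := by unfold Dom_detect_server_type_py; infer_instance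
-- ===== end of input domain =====

-- B replaces A's two any() scans by one explicit loop with an early 'http' return and a
-- deferred saw_sse flag (simpler single pass, same values everywhere).

-- ===== PORT A =====
-- A fetches 'command' but never uses it; the lookup is kept as dead code.
def detect_server_type_py (server_config : List (String × List String)) : String :=
  let d := PySem.Dict.ofList server_config
  let _command := d.get? "command"
  let args := d.getD "args" []
  if args.any (fun arg => PySem.Str.isIn "http://" arg) then "http"
  else if args.any (fun arg => PySem.Str.isIn "sse" arg) then "sse"
  else "stdio"

-- ===== PORT B =====
def pvDetectLoop : List String → Bool → String
  | [], sawSse => if sawSse then "sse" else "stdio"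
  | arg :: rest, sawSse =>
    if PySem.Str.isIn "http://" arg then "http"
    else pvDetectLoop rest (sawSse || PySem.Str.isIn "sse" arg)

def detect_server_type_py_alt (server_config : List (String × List String)) : String :=
  pvDetectLoop ((PySem.Dict.ofList server_config).getD "args" []) false

-- ===== PRECONDITION & SPEC =====
def Spec_detect_server_type_py (server_config : List (String × List String)) (out : String) : Prop := out = detect_server_type_py_alt server_config
instance (server_config : List (String × List String)) (out : String) : Decidable (Spec_detect_server_type_py server_config out) := by unfold Spec_detect_server_type_py; infer_instance

-- ===== CLAIM (what is proved, stated in full; the proofs are below) =====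
def Claim_equal_detect_server_type_py : Prop := ∀ (server_config : List (String × List String)), Dom_detect_server_type_py server_config → Spec_detect_server_type_py server_config (detect_server_type_py server_config)

-- ===== LEMMAS AND PROOFS =====
theorem pvDetectLoop_eq (l : List String) (b : Bool) :
    pvDetectLoop l b =
      if l.any (fun a => PySem.Str.isIn "http://" a) then "http"
      else if b || l.any (fun a => PySem.Str.isIn "sse" a) then "sse"
      else "stdio" := by
  induction l generalizing b with
  | nil => simp [pvDetectLoop]
  | cons a rest ih =>
    cases h : PySem.Str.isIn "http://" a with
    | true => simp only [pvDetectLoop, List.any_cons, h, Bool.true_or, if_pos]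
    | false =>
      simp only [pvDetectLoop, List.any_cons, h, Bool.false_or, ih, Bool.or_assoc,
        Bool.false_eq_true, if_false]
      rfl

-- ===== VERDICT (by name: the statement is the Claim_ definition above) =====
theorem detect_server_type_py_spec : Claim_equal_detect_server_type_py := by
  intro sc _
  unfold Spec_detect_server_type_py detect_server_type_py detect_server_type_py_alt
  rw [pvDetectLoop_eq]
  simp
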